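-- pv_equiv track=rewrite | github.com/choipopik/DM-labs | lab8.py | find_min_cut
-- ===== SOURCE A (Python) =====
-- from collections import deque
--
-- VERTEX_NAMES = ['A', 'B', 'C', 'D', 'E', 'F', 'G', 'H', 'I']
--
-- def find_min_cut(residual_graph, source, original_graph):
--     visited = [False] * len(residual_graph)
--     queue = deque([source])
--     visited[source] = True
--
--     while queue:
--         u = queue.popleft()
--         for v in range(len(residual_graph)):
--             if residual_graph[u][v] > 0 and not visited[v]:
--                 visited[v] = True
--                 queue.append(v)
--
--     left_partition = [VERTEX_NAMES[i] for i in range(len(visited)) if visited[i]]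
--     right_partition = [VERTEX_NAMES[i] for i in range(len(visited)) if not visited[i]]
--
--     min_cut_edges = []
--     for i in range(len(original_graph)):
--         for j in range(len(original_graph[i])):
--             if visited[i] and not visited[j] and original_graph[i][j] > 0:
--                 min_cut_edges.append((VERTEX_NAMES[i], VERTEX_NAMES[j], original_graph[i][j]))
--
--     return left_partition, right_partition, min_cut_edges
-- ===== SOURCE B (Python) =====
-- VERTEX_NAMES = ['A', 'B', 'C', 'D', 'E', 'F', 'G', 'H', 'I']
--
-- def find_min_cut(residual_graph, source, original_graph):
--     n = len(residual_graph)
--     visited = [False] * n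
--
--     def dfs(u):
--         visited[u] = True
--         for v in range(n):
--             if residual_graph[u][v] > 0 and not visited[v]:
--                 dfs(v)
--
--     dfs(source)
--
--     left_partition = [name for name, seen in zip(VERTEX_NAMES, visited) if seen]
--     right_partition = [name for name, seen in zip(VERTEX_NAMES, visited) if not seen]
--
--     min_cut_edges = [(VERTEX_NAMES[i], VERTEX_NAMES[j], w)
--                      for i, row in enumerate(original_graph) if visited[i]
--                      for j, w in enumerate(row)
--                      if not visited[j] and w > 0]
--
--     return left_partition, right_partition, min_cut_edges
-- ===== Notes on version B (the rewrite author's own statement) =====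
-- stated objective: alternative
-- what changed: The iterative BFS over a deque is replaced by a recursive depth-first search, the partitions are built by zipping VERTEX_NAMES with the visited flags instead of indexing over range(len(visited)), and the cut edges come from a single nested comprehension over enumerate that hoists the visited[i] test out of the inner loop.
-- outside the precondition, e.g. on find_min_cut([[0, 0], [0]], 0, []): A returns (['A'], ['B'], []), B returns (['A'], ['B'], [])
import Mathlib
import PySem

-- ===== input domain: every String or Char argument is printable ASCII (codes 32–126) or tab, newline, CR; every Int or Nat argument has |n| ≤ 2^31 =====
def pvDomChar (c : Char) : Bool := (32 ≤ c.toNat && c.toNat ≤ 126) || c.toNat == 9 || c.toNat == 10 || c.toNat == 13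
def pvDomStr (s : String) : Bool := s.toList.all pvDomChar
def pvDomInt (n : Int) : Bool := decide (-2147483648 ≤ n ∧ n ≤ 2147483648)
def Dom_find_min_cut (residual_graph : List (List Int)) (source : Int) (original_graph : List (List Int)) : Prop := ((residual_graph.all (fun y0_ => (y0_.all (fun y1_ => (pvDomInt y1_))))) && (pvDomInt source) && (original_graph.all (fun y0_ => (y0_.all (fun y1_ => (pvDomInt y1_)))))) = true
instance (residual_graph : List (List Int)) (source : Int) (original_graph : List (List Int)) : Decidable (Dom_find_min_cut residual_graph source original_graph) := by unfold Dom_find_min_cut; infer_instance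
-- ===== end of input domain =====

-- ===== PORT A =====
-- B re-implements A with a recursive DFS (instead of BFS over a deque), zip-based partitions and an
-- enumerate comprehension for the cut edges; same return value on Pre_ (alternative decomposition, no speed claim).

-- VERTEX_NAMES (module constant)
def pvNames : List String := ["A", "B", "C", "D", "E", "F", "G", "H", "I"]

-- residual/original weight read: g[u][v] (exact for in-range nonneg indices, guaranteed by Pre_)
def pvW (g : List (List Int)) (u v : Int) : Int := PySem.List.pyGetD (PySem.List.pyGetD g u []) v 0

-- visited[v] (exact for in-range nonneg v, guaranteed by Pre_)
def pvVis (vis : List Bool) (v : Int) : Bool := PySem.List.pyGetD vis v false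

-- VERTEX_NAMES[i] (exact for 0 ≤ i < 9, guaranteed by Pre_)
def pvName (i : Int) : String := PySem.List.pyGetD pvNames i ""

-- body of A's inner 'for v in range(len(residual_graph))'
def pvBfsStep (rg : List (List Int)) (u : Int) (st : List Bool × List Int) (v : Int) :
    List Bool × List Int :=
  if 0 < pvW rg u v ∧ pvVis st.1 v = false
  then (PySem.List.pySetD st.1 v true, st.2 ++ [v])
  else st

-- A's 'while queue' loop; fuel is a totality guard only (never exhausted under Pre_, proved below)
def pvBfsLoop (rg : List (List Int)) : Nat → List Bool → List Int → List Bool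
  | _, visited, [] => visited
  | 0, visited, _ :: _ => visited
  | fuel + 1, visited, u :: qs =>
      let st := (PySem.List.pyRange 0 (PySem.List.len rg) 1).foldl (pvBfsStep rg u) (visited, qs)
      pvBfsLoop rg fuel st.1 st.2

def find_min_cut (residual_graph : List (List Int)) (source : Int) (original_graph : List (List Int)) : List String × List String × (List (String × String × Int)) :=
  let visited0 := List.replicate residual_graph.length false
  let visited := pvBfsLoop residual_graph (residual_graph.length + 1)
      (PySem.List.pySetD visited0 source true) [source]
  let left := (PySem.List.pyRange 0 (PySem.List.len visited) 1).foldl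
      (fun acc i => if pvVis visited i = true then acc ++ [pvName i] else acc) []
  let right := (PySem.List.pyRange 0 (PySem.List.len visited) 1).foldl
      (fun acc i => if pvVis visited i = false then acc ++ [pvName i] else acc) []
  let cut := (PySem.List.pyRange 0 (PySem.List.len original_graph) 1).foldl
      (fun acc i =>
        (PySem.List.pyRange 0 (PySem.List.len (PySem.List.pyGetD original_graph i [])) 1).foldl
          (fun acc2 j =>
            if pvVis visited i = true ∧ pvVis visited j = false ∧ 0 < pvW original_graph i j
            then acc2 ++ [(pvName i, pvName j, pvW original_graph i j)]
            else acc2) acc) []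
  (left, right, cut)

-- ===== PORT B =====

-- B's recursive dfs; fuel is a totality guard only (call depth is bounded by the vertex count under Pre_)
def pvDfs (rg : List (List Int)) : Nat → Int → List Bool → List Bool
  | 0, _, visited => visited
  | fuel + 1, u, visited =>
      (PySem.List.pyRange 0 (PySem.List.len rg) 1).foldl
        (fun vis v => if 0 < pvW rg u v ∧ pvVis vis v = false then pvDfs rg fuel v vis else vis)
        (PySem.List.pySetD visited u true)

def find_min_cut_alt (residual_graph : List (List Int)) (source : Int) (original_graph : List (List Int)) : List String × List String × (List (String × String × Int)) :=
  let visited := pvDfs residual_graph residual_graph.length source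
      (List.replicate residual_graph.length false)
  let left := (pvNames.zip visited).filterMap (fun p => if p.2 = true then some p.1 else none)
  let right := (pvNames.zip visited).filterMap (fun p => if p.2 = false then some p.1 else none)
  let cut := (PySem.List.enumerate original_graph 0).flatMap (fun p =>
      if pvVis visited p.1 = true then
        (PySem.List.enumerate p.2 0).filterMap (fun q =>
          if pvVis visited q.1 = false ∧ 0 < q.2
          then some (pvName p.1, pvName q.1, q.2) else none)
      else [])
  (left, right, cut)

-- ===== PRECONDITION & SPEC =====
-- Pre_ restricts to the natural flow-network shape: at most 9 vertices (VERTEX_NAMES has 9 entries),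
-- a Python-legal source index (negative wrapping included), residual rows wide enough to be scanned,
-- and an original matrix indexable by vertex number.  It excludes inputs where A raises (out-of-range
-- source, a scanned short row, original_graph larger than the vertex set) and also some on which A
-- still returns only by accident of Python indexing: short residual rows that happen to be
-- unreachable and long original rows whose vertex happens to be unvisited; cites in claim.json.
def Pre_find_min_cut (residual_graph : List (List Int)) (source : Int) (original_graph : List (List Int)) : Prop :=
  -(residual_graph.length : Int) ≤ source ∧ source < (residual_graph.length : Int) ∧
  residual_graph.length ≤ 9 ∧
  (∀ row ∈ residual_graph, residual_graph.length ≤ row.length) ∧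
  original_graph.length ≤ residual_graph.length ∧
  (∀ row ∈ original_graph, row.length ≤ residual_graph.length)

instance (residual_graph : List (List Int)) (source : Int) (original_graph : List (List Int)) : Decidable (Pre_find_min_cut residual_graph source original_graph) := by
  unfold Pre_find_min_cut; infer_instance

def pvWitness_find_min_cut : List (List Int) × Int × List (List Int) :=
  ([[0, 1], [0, 0]], 0, [[0, 1], [0, 0]])

def Spec_find_min_cut (residual_graph : List (List Int)) (source : Int) (original_graph : List (List Int)) (out : List String × List String × (List (String × String × Int))) : Prop := out = find_min_cut_alt residual_graph source original_graph
instance (residual_graph : List (List Int)) (source : Int) (original_graph : List (List Int)) (out : List String × List String × (List (String × String × Int))) : Decidable (Spec_find_min_cut residual_graph source original_graph out) := by unfold Spec_find_min_cut; infer_instance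

-- ===== CLAIM (what is proved, stated in full; the proofs are below) =====
def Claim_equal_find_min_cut : Prop := ∀ (residual_graph : List (List Int)) (source : Int) (original_graph : List (List Int)), Dom_find_min_cut residual_graph source original_graph → Pre_find_min_cut residual_graph source original_graph → Spec_find_min_cut residual_graph source original_graph (find_min_cut residual_graph source original_graph)

-- ===== LEMMAS AND PROOFS =====

-- the edge relation of the reachability search: v is a valid vertex and g[u][v] > 0
def pvAdj (rg : List (List Int)) (u v : Int) : Prop :=
  0 ≤ v ∧ v < (rg.length : Int) ∧ 0 < pvW rg u v

def pvReach (rg : List (List Int)) (s x : Int) : Prop := Relation.ReflTransGen (pvAdj rg) s x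

-- ---- small facts about pvVis / pySetD / count ----

theorem pvVis_eq_getD (vis : List Bool) (x : Int) (hx : 0 ≤ x) :
    pvVis vis x = vis.getD x.toNat false := by
  simp [pvVis, PySem.List.pyGetD, PySem.List.pyGet?_of_nonneg (h := hx), List.getD]

theorem pvVis_pySetD_self (vis : List Bool) (v : Int) (h0 : 0 ≤ v) (h1 : v < (vis.length : Int)) :
    pvVis (PySem.List.pySetD vis v true) v = true := by
  rw [pvVis_eq_getD _ _ h0, PySem.List.pySetD_of_nonneg (h := h0)]
  have hv : v.toNat < vis.length := by omega
  simp [List.getD, hv]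

theorem pvVis_pySetD_ne (vis : List Bool) (v x : Int) (b : Bool)
    (h0 : 0 ≤ v) (hx : 0 ≤ x) (hne : x ≠ v) :
    pvVis (PySem.List.pySetD vis v b) x = pvVis vis x := by
  rw [pvVis_eq_getD _ _ hx, pvVis_eq_getD _ _ hx, PySem.List.pySetD_of_nonneg (h := h0)]
  have : x.toNat ≠ v.toNat := by omega
  simp only [List.getD]
  rw [List.getElem?_set_ne (Ne.symm this)]

theorem length_pvSet (vis : List Bool) (v : Int) (b : Bool) :
    (PySem.List.pySetD vis v b).length = vis.length := PySem.List.length_pySetD _ _ _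

theorem pvVis_replicate (n : Nat) (x : Int) (hx : 0 ≤ x) :
    pvVis (List.replicate n false) x = false := by
  rw [pvVis_eq_getD _ _ hx]
  rcases Nat.lt_or_ge x.toNat n with h | h
  · simp [List.getD, h]
  · simp [List.getD, h]

theorem count_false_set (vis : List Bool) (v : Int) (h0 : 0 ≤ v) (h1 : v < (vis.length : Int))
    (hf : pvVis vis v = false) :
    (PySem.List.pySetD vis v true).count false + 1 = vis.count false := by
  rw [PySem.List.pySetD_of_nonneg (h := h0)]
  have hv : v.toNat < vis.length := by omega
  have hgf : vis[v.toNat] = false := by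
    rw [pvVis_eq_getD _ _ h0] at hf
    simpa [List.getD, List.getElem?_eq_getElem hv] using hf
  clear hf h1
  induction vis generalizing v with
  | nil => simp at hv
  | cons a l ih =>
    rcases Nat.eq_zero_or_pos v.toNat with h | h
    · simp only [h, List.getElem_cons_zero] at hgf
      subst hgf
      simp [h]
    · obtain ⟨m, hm⟩ : ∃ m : Nat, v.toNat = m + 1 := ⟨v.toNat - 1, by omega⟩
      have := ih (m : Int) (by omega) (by simp [hm] at hv; omega)
        (by simpa [hm] using hgf)
      simp only [hm, List.set_cons_succ, List.count_cons]
      simp only [Int.toNat_natCast] at this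
      omega

theorem count_false_pos (vis : List Bool) (v : Int) (h0 : 0 ≤ v) (h1 : v < (vis.length : Int))
    (hf : pvVis vis v = false) : 1 ≤ vis.count false := by
  have hv : v.toNat < vis.length := by omega
  have hgf : vis[v.toNat] = false := by
    rw [pvVis_eq_getD _ _ h0] at hf
    simpa [List.getD, List.getElem?_eq_getElem hv] using hf
  have : false ∈ vis := hgf ▸ List.getElem_mem hv
  exact List.count_pos_iff.mpr this

-- ---- the BFS inner for-loop ----

theorem bfs_fold_spec (rg : List (List Int)) (u : Int) :
    ∀ (L : List Int) (vis : List Bool) (q : List Int),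
    (∀ v ∈ L, 0 ≤ v ∧ v < (vis.length : Int)) →
    ((L.foldl (pvBfsStep rg u) (vis, q)).1.length = vis.length ∧
     (∀ x, 0 ≤ x → pvVis vis x = true → pvVis (L.foldl (pvBfsStep rg u) (vis, q)).1 x = true) ∧
     (∀ x, 0 ≤ x → pvVis (L.foldl (pvBfsStep rg u) (vis, q)).1 x = true →
        pvVis vis x = true ∨ (x ∈ L ∧ 0 < pvW rg u x)) ∧
     (∀ y ∈ q, y ∈ (L.foldl (pvBfsStep rg u) (vis, q)).2) ∧
     (∀ y ∈ (L.foldl (pvBfsStep rg u) (vis, q)).2, y ∈ q ∨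
        (0 ≤ y ∧ y < (vis.length : Int) ∧ pvVis (L.foldl (pvBfsStep rg u) (vis, q)).1 y = true ∧
         0 < pvW rg u y)) ∧
     (∀ x, 0 ≤ x → pvVis (L.foldl (pvBfsStep rg u) (vis, q)).1 x = true → pvVis vis x = false →
        x ∈ (L.foldl (pvBfsStep rg u) (vis, q)).2) ∧
     (∀ v ∈ L, 0 < pvW rg u v → pvVis (L.foldl (pvBfsStep rg u) (vis, q)).1 v = true) ∧
     (L.foldl (pvBfsStep rg u) (vis, q)).2.length + (L.foldl (pvBfsStep rg u) (vis, q)).1.count false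
       = q.length + vis.count false) := by
  intro L
  induction L with
  | nil =>
    intro vis q _
    refine ⟨rfl, fun x _ h => h, fun x _ h => Or.inl h, fun y hy => hy,
      fun y hy => Or.inl hy, ?_, by simp, rfl⟩
    intro x _ h1 h2
    simp only [List.foldl_nil] at h1
    rw [h1] at h2
    cases h2
  | cons v L ih =>
    intro vis q hL
    obtain ⟨hv0, hv1⟩ := hL v (by simp)
    by_cases hc : 0 < pvW rg u v ∧ pvVis vis v = false
    · have hstep : pvBfsStep rg u (vis, q) v = (PySem.List.pySetD vis v true, q ++ [v]) := by
        simp [pvBfsStep, hc]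
      have hlen1 : (PySem.List.pySetD vis v true).length = vis.length := length_pvSet _ _ _
      obtain ⟨ih1, ih2, ih3, ih4, ih5, ih6, ih7, ih8⟩ :=
        ih (PySem.List.pySetD vis v true) (q ++ [v])
          (fun w hw => by rw [hlen1]; exact hL w (by simp [hw]))
      simp only [List.foldl_cons, hstep]
      have hmono1 : ∀ x, 0 ≤ x → pvVis vis x = true →
          pvVis (PySem.List.pySetD vis v true) x = true := by
        intro x hx h
        by_cases hxv : x = v
        · rw [hxv]; exact pvVis_pySetD_self vis v hv0 hv1
        · rw [pvVis_pySetD_ne vis v x true hv0 hx hxv]; exact h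
      have hvset : pvVis (PySem.List.pySetD vis v true) v = true := pvVis_pySetD_self vis v hv0 hv1
      refine ⟨ih1.trans hlen1, fun x hx h => ih2 x hx (hmono1 x hx h), ?_, ?_, ?_, ?_, ?_, ?_⟩
      · intro x hx h
        rcases ih3 x hx h with h' | h'
        · by_cases hxv : x = v
          · exact Or.inr ⟨by simp [hxv], hxv ▸ hc.1⟩
          · rw [pvVis_pySetD_ne vis v x true hv0 hx hxv] at h'; exact Or.inl h'
        · exact Or.inr ⟨by simp [h'.1], h'.2⟩
      · intro y hy; exact ih4 y (by simp [hy])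
      · intro y hy
        rcases ih5 y hy with h' | h'
        · rcases List.mem_append.mp h' with h'' | h''
          · exact Or.inl h''
          · have : y = v := by simpa using h''
            subst this
            exact Or.inr ⟨hv0, hv1, ih2 y hv0 hvset, hc.1⟩
        · exact Or.inr ⟨h'.1, by rw [← hlen1]; exact h'.2.1, h'.2.2.1, h'.2.2.2⟩
      · intro x hx h hf
        by_cases hxv : x = v
        · subst hxv; exact ih4 x (by simp)
        · exact ih6 x hx h (by rw [pvVis_pySetD_ne vis v x true hv0 hx hxv]; exact hf)
      · intro w hw hpw
        rcases List.mem_cons.mp hw with h' | h'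
        · subst h'; exact ih2 w hv0 hvset
        · exact ih7 w h' hpw
      · have hcnt : (PySem.List.pySetD vis v true).count false + 1 = vis.count false :=
          count_false_set vis v hv0 hv1 hc.2
        rw [ih8]; simp; omega
    · have hstep : pvBfsStep rg u (vis, q) v = (vis, q) := by
        simp only [pvBfsStep]; rw [if_neg hc]
      obtain ⟨ih1, ih2, ih3, ih4, ih5, ih6, ih7, ih8⟩ :=
        ih vis q (fun w hw => hL w (by simp [hw]))
      simp only [List.foldl_cons, hstep]
      refine ⟨ih1, ih2, ?_, ih4, ih5, ih6, ?_, ih8⟩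
      · intro x hx h
        rcases ih3 x hx h with h' | h'
        · exact Or.inl h'
        · exact Or.inr ⟨by simp [h'.1], h'.2⟩
      · intro w hw hpw
        rcases List.mem_cons.mp hw with h' | h'
        · subst h'
          have hvt : pvVis vis w = true := by
            by_contra hft
            exact hc ⟨hpw, by simpa using hft⟩
          exact ih2 w hv0 hvt
        · exact ih7 w h' hpw

-- ---- the BFS while-loop ----

theorem bfs_loop_spec (rg : List (List Int)) (s : Int) :
    ∀ (fuel : Nat) (vis : List Bool) (q : List Int),
    vis.length = rg.length →
    (∀ x, 0 ≤ x → pvVis vis x = true → pvReach rg s x) →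
    (∀ y ∈ q, 0 ≤ y ∧ pvVis vis y = true) →
    (∀ x, 0 ≤ x → pvVis vis x = true → x ∈ q ∨ ∀ v, pvAdj rg x v → pvVis vis v = true) →
    q.length + vis.count false ≤ fuel →
    ((pvBfsLoop rg fuel vis q).length = rg.length ∧
     (∀ x, 0 ≤ x → pvVis vis x = true → pvVis (pvBfsLoop rg fuel vis q) x = true) ∧
     (∀ x, 0 ≤ x → pvVis (pvBfsLoop rg fuel vis q) x = true → pvReach rg s x) ∧
     (∀ x, 0 ≤ x → pvVis (pvBfsLoop rg fuel vis q) x = true →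
        ∀ v, pvAdj rg x v → pvVis (pvBfsLoop rg fuel vis q) v = true)) := by
  intro fuel
  induction fuel with
  | zero =>
    intro vis q hlen hsound hq hclos hfuel
    have hq0 : q = [] := List.eq_nil_of_length_eq_zero (by omega)
    subst hq0
    simp only [pvBfsLoop]
    exact ⟨hlen, fun x _ h => h, hsound, fun x hx h => by
      rcases hclos x hx h with h' | h'
      · cases h'
      · exact h'⟩
  | succ fuel ih =>
    intro vis q hlen hsound hq hclos hfuel
    cases q with
    | nil =>
      simp only [pvBfsLoop]
      exact ⟨hlen, fun x _ h => h, hsound, fun x hx h => by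
        rcases hclos x hx h with h' | h'
        · cases h'
        · exact h'⟩
    | cons u qs =>
      obtain ⟨f1, f2, f3, f4, f5, f6, f7, f8⟩ :=
        bfs_fold_spec rg u (PySem.List.pyRange 0 (PySem.List.len rg) 1) vis qs
          (fun v hv => by
            have := PySem.List.mem_pyRange_one.mp hv
            simp only [PySem.List.len_eq] at this
            exact ⟨this.1, by rw [hlen]; exact this.2⟩)
      set st := (PySem.List.pyRange 0 (PySem.List.len rg) 1).foldl (pvBfsStep rg u) (vis, qs)
        with hst
      have hrun : pvBfsLoop rg (fuel + 1) vis (u :: qs) = pvBfsLoop rg fuel st.1 st.2 := by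
        rw [pvBfsLoop]
      obtain ⟨hu0, huv⟩ := hq u (by simp)
      have hreach_u : pvReach rg s u := hsound u hu0 huv
      have hsound' : ∀ x, 0 ≤ x → pvVis st.1 x = true → pvReach rg s x := by
        intro x hx h
        rcases f3 x hx h with h' | h'
        · exact hsound x hx h'
        · have hb := PySem.List.mem_pyRange_one.mp h'.1
          simp only [PySem.List.len_eq] at hb
          exact Relation.ReflTransGen.tail hreach_u ⟨hb.1, hb.2, h'.2⟩
      have hq' : ∀ y ∈ st.2, 0 ≤ y ∧ pvVis st.1 y = true := by
        intro y hy
        rcases f5 y hy with h' | h'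
        · obtain ⟨hy0, hyv⟩ := hq y (by simp [h'])
          exact ⟨hy0, f2 y hy0 hyv⟩
        · exact ⟨h'.1, h'.2.2.1⟩
      have hclos' : ∀ x, 0 ≤ x → pvVis st.1 x = true →
          x ∈ st.2 ∨ ∀ v, pvAdj rg x v → pvVis st.1 v = true := by
        intro x hx h
        by_cases hold : pvVis vis x = true
        · rcases hclos x hx hold with h' | h'
          · rcases List.mem_cons.mp h' with h'' | h''
            · subst h''
              refine Or.inr (fun v hv => ?_)
              refine f7 v ?_ hv.2.2
              refine PySem.List.mem_pyRange_one.mpr ?_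
              simp only [PySem.List.len_eq]
              exact ⟨hv.1, hv.2.1⟩
            · exact Or.inl (f4 x h'')
          · exact Or.inr (fun v hv => f2 v hv.1 (h' v hv))
        · exact Or.inl (f6 x hx h (by simpa using hold))
      have hfuel' : st.2.length + st.1.count false ≤ fuel := by
        have : (u :: qs).length = qs.length + 1 := by simp
        omega
      obtain ⟨g1, g2, g3, g4⟩ := ih st.1 st.2 (f1.trans hlen) hsound' hq' hclos' hfuel'
      rw [hrun]
      exact ⟨g1, fun x hx h => g2 x hx (f2 x hx h), g3, g4⟩

-- ---- the DFS ----

theorem dfs_spec (rg : List (List Int)) :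
    ∀ (fuel : Nat) (u : Int) (vis : List Bool),
    vis.length = rg.length → 0 ≤ u → u < (rg.length : Int) → pvVis vis u = false →
    vis.count false ≤ fuel →
    ((pvDfs rg fuel u vis).length = vis.length ∧
     (∀ x, 0 ≤ x → pvVis vis x = true → pvVis (pvDfs rg fuel u vis) x = true) ∧
     pvVis (pvDfs rg fuel u vis) u = true ∧
     (∀ x, 0 ≤ x → pvVis (pvDfs rg fuel u vis) x = true →
        pvVis vis x = true ∨ pvReach rg u x) ∧
     (∀ x, 0 ≤ x → pvVis (pvDfs rg fuel u vis) x = true → pvVis vis x = false →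
        ∀ v, pvAdj rg x v → pvVis (pvDfs rg fuel u vis) v = true) ∧
     (pvDfs rg fuel u vis).count false < vis.count false) := by
  intro fuel
  induction fuel with
  | zero =>
    intro u vis hlen hu0 hu1 huf hfuel
    have := count_false_pos vis u hu0 (by rw [hlen]; exact hu1) huf
    omega
  | succ fuel ih =>
    intro u vis hlen hu0 hu1 huf hfuel
    have hul : u < (vis.length : Int) := by rw [hlen]; exact hu1
    have hvis1self : pvVis (PySem.List.pySetD vis u true) u = true :=
      pvVis_pySetD_self vis u hu0 hul
    have hcnt1 : (PySem.List.pySetD vis u true).count false + 1 = vis.count false :=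
      count_false_set vis u hu0 hul huf
    -- the inner for-loop of dfs, generalized over the candidate list and the current visited array
    have inner : ∀ (L : List Int) (visc : List Bool),
        (∀ v ∈ L, 0 ≤ v ∧ v < (rg.length : Int)) →
        visc.length = rg.length →
        (∀ x, 0 ≤ x → pvVis visc x = true → pvVis vis x = true ∨ pvReach rg u x) →
        (∀ x, 0 ≤ x → pvVis visc x = true → pvVis vis x = false →
           x = u ∨ ∀ v, pvAdj rg x v → pvVis visc v = true) →
        visc.count false < vis.count false →
        ((L.foldl (fun vis v => if 0 < pvW rg u v ∧ pvVis vis v = false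
            then pvDfs rg fuel v vis else vis) visc).length = rg.length ∧
         (∀ x, 0 ≤ x → pvVis visc x = true →
            pvVis (L.foldl (fun vis v => if 0 < pvW rg u v ∧ pvVis vis v = false
              then pvDfs rg fuel v vis else vis) visc) x = true) ∧
         (∀ x, 0 ≤ x →
            pvVis (L.foldl (fun vis v => if 0 < pvW rg u v ∧ pvVis vis v = false
              then pvDfs rg fuel v vis else vis) visc) x = true →
            pvVis vis x = true ∨ pvReach rg u x) ∧
         (∀ x, 0 ≤ x →
            pvVis (L.foldl (fun vis v => if 0 < pvW rg u v ∧ pvVis vis v = false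
              then pvDfs rg fuel v vis else vis) visc) x = true →
            pvVis vis x = false →
            x = u ∨ ∀ v, pvAdj rg x v →
              pvVis (L.foldl (fun vis v => if 0 < pvW rg u v ∧ pvVis vis v = false
                then pvDfs rg fuel v vis else vis) visc) v = true) ∧
         (L.foldl (fun vis v => if 0 < pvW rg u v ∧ pvVis vis v = false
            then pvDfs rg fuel v vis else vis) visc).count false < vis.count false ∧
         (∀ v ∈ L, 0 < pvW rg u v →
            pvVis (L.foldl (fun vis v => if 0 < pvW rg u v ∧ pvVis vis v = false
              then pvDfs rg fuel v vis else vis) visc) v = true)) := by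
      intro L
      induction L with
      | nil =>
        intro visc _ hlen' hsound hclos hcnt
        exact ⟨hlen', fun x _ h => h, hsound, fun x hx h hf => hclos x hx h hf, hcnt, by simp⟩
      | cons v L ihL =>
        intro visc hL hlen' hsound hclos hcnt
        obtain ⟨hv0, hv1⟩ := hL v (by simp)
        by_cases hc : 0 < pvW rg u v ∧ pvVis visc v = false
        · have hstep : (fun vis v => if 0 < pvW rg u v ∧ pvVis vis v = false
              then pvDfs rg fuel v vis else vis) visc v = pvDfs rg fuel v visc := by
            simp only []
            rw [if_pos hc]
          obtain ⟨d1, d2, d3, d4, d5, d6⟩ :=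
            ih v visc hlen' hv0 hv1 hc.2 (by omega)
          have hadjuv : pvAdj rg u v := ⟨hv0, hv1, hc.1⟩
          obtain ⟨j1, j2, j3, j4, j5, j6⟩ := ihL (pvDfs rg fuel v visc)
            (fun w hw => hL w (by simp [hw]))
            (d1.trans hlen')
            (by
              intro x hx h
              rcases d4 x hx h with h' | h'
              · exact hsound x hx h'
              · exact Or.inr (Relation.ReflTransGen.head hadjuv h'))
            (by
              intro x hx h hf
              by_cases hxc : pvVis visc x = true
              · rcases hclos x hx hxc hf with h' | h'
                · exact Or.inl h'
                · exact Or.inr (fun w hw => d2 w hw.1 (h' w hw))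
              · exact Or.inr (d5 x hx h (by simpa using hxc)))
            (by omega)
          simp only [List.foldl_cons, hstep]
          refine ⟨j1, fun x hx h => j2 x hx (d2 x hx h), j3, j4, j5, ?_⟩
          intro w hw hpw
          rcases List.mem_cons.mp hw with h' | h'
          · subst h'
            exact j2 w hv0 d3
          · exact j6 w h' hpw
        · have hstep : (fun vis v => if 0 < pvW rg u v ∧ pvVis vis v = false
              then pvDfs rg fuel v vis else vis) visc v = visc := by
            simp only []
            rw [if_neg hc]
          obtain ⟨j1, j2, j3, j4, j5, j6⟩ := ihL visc
            (fun w hw => hL w (by simp [hw])) hlen' hsound hclos hcnt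
          simp only [List.foldl_cons, hstep]
          refine ⟨j1, j2, j3, j4, j5, ?_⟩
          intro w hw hpw
          rcases List.mem_cons.mp hw with h' | h'
          · subst h'
            have hvt : pvVis visc w = true := by
              by_contra hft
              exact hc ⟨hpw, by simpa using hft⟩
            exact j2 w hv0 hvt
          · exact j6 w h' hpw
    have hrun : pvDfs rg (fuel + 1) u vis
        = (PySem.List.pyRange 0 (PySem.List.len rg) 1).foldl
            (fun vis v => if 0 < pvW rg u v ∧ pvVis vis v = false
              then pvDfs rg fuel v vis else vis)
            (PySem.List.pySetD vis u true) := by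
      rw [pvDfs]
    have hmono1 : ∀ x, 0 ≤ x → pvVis vis x = true →
        pvVis (PySem.List.pySetD vis u true) x = true := by
      intro x hx h
      by_cases hxu : x = u
      · rw [hxu]
        exact hvis1self
      · rw [pvVis_pySetD_ne vis u x true hu0 hx hxu]
        exact h
    obtain ⟨j1, j2, j3, j4, j5, j6⟩ := inner (PySem.List.pyRange 0 (PySem.List.len rg) 1)
      (PySem.List.pySetD vis u true)
      (fun w hw => by
        have := PySem.List.mem_pyRange_one.mp hw
        simpa using this)
      ((length_pvSet _ _ _).trans hlen)
      (by
        intro x hx h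
        by_cases hxu : x = u
        · exact Or.inr (hxu ▸ Relation.ReflTransGen.refl)
        · rw [pvVis_pySetD_ne vis u x true hu0 hx hxu] at h
          exact Or.inl h)
      (by
        intro x hx h hf
        by_cases hxu : x = u
        · exact Or.inl hxu
        · rw [pvVis_pySetD_ne vis u x true hu0 hx hxu] at h
          rw [h] at hf
          cases hf)
      (by omega)
    rw [hrun]
    refine ⟨j1.trans hlen.symm, fun x hx h => j2 x hx (hmono1 x hx h),
      j2 u hu0 hvis1self, j3, ?_, by omega⟩
    intro x hx h hf
    rcases j4 x hx h hf with h' | h'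
    · subst h'
      intro v hv
      refine j6 v ?_ hv.2.2
      refine PySem.List.mem_pyRange_one.mpr ?_
      simp only [PySem.List.len_eq]
      exact ⟨hv.1, hv.2.1⟩
    · exact h'

-- ---- the two visited arrays agree ----

theorem visited_agree (rg : List (List Int)) (s : Int)
    (hs0 : 0 ≤ s) (hs1 : s < (rg.length : Int)) :
    pvBfsLoop rg (rg.length + 1)
        (PySem.List.pySetD (List.replicate rg.length false) s true) [s]
      = pvDfs rg rg.length s (List.replicate rg.length false) := by
  have hrep : (List.replicate rg.length false).length = rg.length := by simp
  have hsl : s < ((List.replicate rg.length false).length : Int) := by rw [hrep]; exact hs1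
  have hsf : pvVis (List.replicate rg.length false) s = false := pvVis_replicate _ _ hs0
  have hcnt0 : (List.replicate rg.length false).count false = rg.length := by simp
  have hcnt1 : (PySem.List.pySetD (List.replicate rg.length false) s true).count false + 1
      = rg.length := by
    rw [count_false_set _ _ hs0 hsl hsf]; exact hcnt0
  have hself : pvVis (PySem.List.pySetD (List.replicate rg.length false) s true) s = true :=
    pvVis_pySetD_self _ _ hs0 hsl
  -- reachable implies visited, for any closed visited array containing s
  have complete : ∀ (r : List Bool), pvVis r s = true →
      (∀ x, 0 ≤ x → pvVis r x = true → ∀ v, pvAdj rg x v → pvVis r v = true) →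
      ∀ x, pvReach rg s x → 0 ≤ x ∧ pvVis r x = true := by
    intro r hs hcl x hx
    induction hx with
    | refl => exact ⟨hs0, hs⟩
    | tail h1 h2 ihh => exact ⟨h2.1, hcl _ ihh.1 ihh.2 _ h2⟩
  -- the BFS side
  obtain ⟨b1, b2, b3, b4⟩ := bfs_loop_spec rg s (rg.length + 1)
    (PySem.List.pySetD (List.replicate rg.length false) s true) [s]
    ((length_pvSet _ _ _).trans hrep)
    (by
      intro x hx h
      by_cases hxs : x = s
      · exact hxs ▸ Relation.ReflTransGen.refl
      · rw [pvVis_pySetD_ne _ _ _ _ hs0 hx hxs, pvVis_replicate _ _ hx] at h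
        cases h)
    (by
      intro y hy
      have : y = s := by simpa using hy
      subst this
      exact ⟨hs0, hself⟩)
    (by
      intro x hx h
      by_cases hxs : x = s
      · exact Or.inl (by simp [hxs])
      · rw [pvVis_pySetD_ne _ _ _ _ hs0 hx hxs, pvVis_replicate _ _ hx] at h
        cases h)
    (by simp; omega)
  have hBs : pvVis (pvBfsLoop rg (rg.length + 1)
      (PySem.List.pySetD (List.replicate rg.length false) s true) [s]) s = true :=
    b2 s hs0 hself
  -- the DFS side
  obtain ⟨d1, d2, d3, d4, d5, d6⟩ := dfs_spec rg rg.length s (List.replicate rg.length false)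
    hrep hs0 hs1 hsf (by omega)
  have hDlen : (pvDfs rg rg.length s (List.replicate rg.length false)).length = rg.length :=
    d1.trans hrep
  have hDsound : ∀ x, 0 ≤ x →
      pvVis (pvDfs rg rg.length s (List.replicate rg.length false)) x = true →
      pvReach rg s x := by
    intro x hx h
    rcases d4 x hx h with h' | h'
    · rw [pvVis_replicate _ _ hx] at h'; cases h'
    · exact h'
  have hDclos : ∀ x, 0 ≤ x →
      pvVis (pvDfs rg rg.length s (List.replicate rg.length false)) x = true →
      ∀ v, pvAdj rg x v →
      pvVis (pvDfs rg rg.length s (List.replicate rg.length false)) v = true := by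
    intro x hx h
    exact d5 x hx h (pvVis_replicate _ _ hx)
  -- elementwise agreement
  refine List.ext_getElem (by rw [b1, hDlen]) ?_
  intro i h1 h2
  have hiv : ∀ (r : List Bool) (hr : i < r.length), r[i] = pvVis r (i : Int) := by
    intro r hr
    rw [pvVis_eq_getD r (i : Int) (by positivity)]
    simp [List.getD, List.getElem?_eq_getElem hr]
  rw [hiv _ h1, hiv _ h2]
  have hBiff : pvVis (pvBfsLoop rg (rg.length + 1)
      (PySem.List.pySetD (List.replicate rg.length false) s true) [s]) (i : Int) = true
      ↔ pvReach rg s (i : Int) := by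
    constructor
    · exact b3 (i : Int) (by positivity)
    · intro h
      exact (complete _ hBs b4 _ h).2
  have hDiff : pvVis (pvDfs rg rg.length s (List.replicate rg.length false)) (i : Int) = true
      ↔ pvReach rg s (i : Int) := by
    constructor
    · exact hDsound (i : Int) (by positivity)
    · intro h
      exact (complete _ d3 hDclos _ h).2
  exact Bool.eq_iff_iff.mpr (hBiff.trans hDiff.symm)

-- ---- a negative source index wraps: both searches behave as from source + n ----

theorem pyGetD_row_shift (g : List (List Int)) (s : Int)
    (h0 : -(g.length : Int) ≤ s) (h1 : s < 0) :
    PySem.List.pyGetD g s ([] : List Int) = PySem.List.pyGetD g (s + g.length) ([] : List Int) := by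
  have hk : s = -(((-s).toNat : Nat) : Int) := by omega
  rw [hk, PySem.List.pyGetD_neg_natCast _ _ _ (by omega) (by omega),
    PySem.List.pyGetD_eq_getElem _ _ (by omega) (by omega)]
  congr 1
  omega

theorem pvW_shift (rg : List (List Int)) (s : Int)
    (h0 : -(rg.length : Int) ≤ s) (h1 : s < 0) (v : Int) :
    pvW rg s v = pvW rg (s + rg.length) v := by
  unfold pvW
  rw [pyGetD_row_shift rg s h0 h1]

theorem pySetD_shift (vis : List Bool) (s : Int) (b : Bool)
    (h0 : -(vis.length : Int) ≤ s) (h1 : s < 0) :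
    PySem.List.pySetD vis s b = PySem.List.pySetD vis (s + vis.length) b := by
  unfold PySem.List.pySetD PySem.List.pySet? PySem.List.pyIdx?
  rw [if_neg (by omega : ¬ (0 : Int) ≤ s), if_pos h0,
    if_pos (by omega : (0 : Int) ≤ s + vis.length),
    if_pos (by omega : s + (vis.length : Int) < vis.length)]
  simp only [Option.map_some, Option.getD_some]
  congr 1
  omega

theorem bfs_shift (rg : List (List Int)) (s : Int) (fuel : Nat) (vis : List Bool)
    (hlen : vis.length = rg.length) (h0 : -(rg.length : Int) ≤ s) (h1 : s < 0) :
    pvBfsLoop rg (fuel + 1) (PySem.List.pySetD vis s true) [s]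
      = pvBfsLoop rg (fuel + 1) (PySem.List.pySetD vis (s + rg.length) true) [s + rg.length] := by
  have hset : PySem.List.pySetD vis s true = PySem.List.pySetD vis (s + rg.length) true := by
    rw [pySetD_shift vis s true (by omega) h1, hlen]
  have hstep : pvBfsStep rg s = pvBfsStep rg (s + rg.length) := by
    funext st v
    unfold pvBfsStep
    rw [pvW_shift rg s h0 h1 v]
  rw [hset]
  simp only [pvBfsLoop]
  rw [hstep]

theorem dfs_shift (rg : List (List Int)) (s : Int) (fuel : Nat) (vis : List Bool)
    (hfuel : 0 < fuel) (hlen : vis.length = rg.length)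
    (h0 : -(rg.length : Int) ≤ s) (h1 : s < 0) :
    pvDfs rg fuel s vis = pvDfs rg fuel (s + rg.length) vis := by
  cases fuel with
  | zero => omega
  | succ fuel =>
    have hset : PySem.List.pySetD vis s true = PySem.List.pySetD vis (s + rg.length) true := by
      rw [pySetD_shift vis s true (by omega) h1, hlen]
    have hstep : (fun (vis : List Bool) v => if 0 < pvW rg s v ∧ pvVis vis v = false
        then pvDfs rg fuel v vis else vis)
        = fun vis v => if 0 < pvW rg (s + rg.length) v ∧ pvVis vis v = false
            then pvDfs rg fuel v vis else vis := by
      funext vis v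
      rw [pvW_shift rg s h0 h1 v]
    simp only [pvDfs]
    rw [hset, hstep]

-- combined: the two visited arrays agree for every Python-legal source index
theorem visited_agree_all (rg : List (List Int)) (s : Int)
    (h0 : -(rg.length : Int) ≤ s) (h1 : s < (rg.length : Int)) :
    pvBfsLoop rg (rg.length + 1)
        (PySem.List.pySetD (List.replicate rg.length false) s true) [s]
      = pvDfs rg rg.length s (List.replicate rg.length false)
    ∧ (pvDfs rg rg.length s (List.replicate rg.length false)).length = rg.length := by
  have hdl : ∀ t, 0 ≤ t → t < (rg.length : Int) →
      (pvDfs rg rg.length t (List.replicate rg.length false)).length = rg.length := by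
    intro t ht0 ht1
    have := dfs_spec rg rg.length t (List.replicate rg.length false)
      (by simp) ht0 ht1 (pvVis_replicate _ _ ht0) (by simp)
    simpa using this.1
  by_cases hp : 0 ≤ s
  · exact ⟨visited_agree rg s hp h1, hdl s hp h1⟩
  · have hrep : (List.replicate rg.length false).length = rg.length := by simp
    rw [bfs_shift rg s rg.length _ hrep h0 (by omega),
      dfs_shift rg s rg.length _ (by omega) hrep h0 (by omega)]
    exact ⟨visited_agree rg (s + rg.length) (by omega) (by omega),
      hdl (s + rg.length) (by omega) (by omega)⟩

-- ---- downstream: partitions and cut edges coincide for equal visited arrays ----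

-- (l.filter p).map f as a filterMap (no such Mathlib/PySem lemma in this form)
theorem mapFilter_eq_filterMap {α β : Type} (p : α → Bool) (f : α → β) (l : List α) :
    (l.filter p).map f = l.filterMap (fun x => if p x then some (f x) else none) := by
  induction l with
  | nil => rfl
  | cons x l ih => by_cases h : p x <;> simp [h, ih]

theorem part_core (b : Bool) : ∀ (vis : List Bool) (names : List String),
    vis.length ≤ names.length →
    ((List.range vis.length).filter (fun k => vis.getD k false == b)).map
        (fun k => names.getD k "")
      = (names.zip vis).filterMap (fun p => if p.2 = b then some p.1 else none) := by
  intro vis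
  induction vis with
  | nil => intro names _; simp
  | cons a vis ih =>
    intro names hlen
    cases names with
    | nil => simp at hlen
    | cons nm names =>
      have hlen' : vis.length ≤ names.length := by simpa using hlen
      by_cases hab : a = b
      · simp [List.range_succ_eq_map, hab, List.filter_map, Function.comp_def,
              List.map_map]
        simpa [List.getD] using ih names hlen'
      · simp [List.range_succ_eq_map, hab, List.filter_map, Function.comp_def,
              List.map_map]
        simpa [List.getD] using ih names hlen'

theorem partition_eq (vis : List Bool) (b : Bool) (h9 : vis.length ≤ 9) :
    (PySem.List.pyRange 0 (PySem.List.len vis) 1).foldl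
        (fun acc i => if pvVis vis i = b then acc ++ [pvName i] else acc) []
      = (pvNames.zip vis).filterMap (fun p => if p.2 = b then some p.1 else none) := by
  have hfun : (fun (acc : List String) i => if pvVis vis i = b then acc ++ [pvName i] else acc)
      = fun acc i => if (fun i => pvVis vis i == b) i = true then acc ++ [pvName i] else acc := by
    funext acc i
    by_cases h : pvVis vis i = b <;> simp [h]
  rw [hfun, PySem.List.foldl_append_if, List.nil_append, PySem.List.len_eq,
    PySem.List.pyRange_zero_nat, List.filter_map, List.map_map]
  have h1 : List.filter ((fun i => pvVis vis i == b) ∘ fun (k : Nat) => (k : Int))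
      (List.range vis.length) = List.filter (fun k => vis.getD k false == b)
      (List.range vis.length) := by
    apply List.filter_congr
    intro k _
    simp [Function.comp, pvVis]
  rw [h1]
  have h2 : List.map ((fun i => pvName i) ∘ fun (k : Nat) => (k : Int))
      (List.filter (fun k => vis.getD k false == b) (List.range vis.length))
      = List.map (fun k => pvNames.getD k "")
        (List.filter (fun k => vis.getD k false == b) (List.range vis.length)) := by
    apply List.map_congr_left
    intro k _
    simp [Function.comp, pvName]
  rw [h2]
  exact part_core b vis pvNames (by simp [pvNames]; omega)

theorem cut_eq (vis : List Bool) (og : List (List Int)) :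
    (PySem.List.pyRange 0 (PySem.List.len og) 1).foldl
      (fun acc i =>
        (PySem.List.pyRange 0 (PySem.List.len (PySem.List.pyGetD og i [])) 1).foldl
          (fun acc2 j =>
            if pvVis vis i = true ∧ pvVis vis j = false ∧ 0 < pvW og i j
            then acc2 ++ [(pvName i, pvName j, pvW og i j)]
            else acc2) acc) []
    = (PySem.List.enumerate og 0).flatMap (fun p =>
        if pvVis vis p.1 = true then
          (PySem.List.enumerate p.2 0).filterMap (fun q =>
            if pvVis vis q.1 = false ∧ 0 < q.2
            then some (pvName p.1, pvName q.1, q.2) else none)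
        else []) := by
  have hinner : ∀ (i : Int) (acc : List (String × String × Int)),
      (PySem.List.pyRange 0 (PySem.List.len (PySem.List.pyGetD og i [])) 1).foldl
        (fun acc2 j => if pvVis vis i = true ∧ pvVis vis j = false ∧ 0 < pvW og i j
          then acc2 ++ [(pvName i, pvName j, pvW og i j)] else acc2) acc
      = acc ++ ((PySem.List.pyRange 0 (PySem.List.len (PySem.List.pyGetD og i [])) 1).filter
          (fun j => pvVis vis i && !pvVis vis j && decide (0 < pvW og i j))).map
          (fun j => (pvName i, pvName j, pvW og i j)) := by
    intro i acc
    have hfun : (fun (acc2 : List (String × String × Int)) j =>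
        if pvVis vis i = true ∧ pvVis vis j = false ∧ 0 < pvW og i j
        then acc2 ++ [(pvName i, pvName j, pvW og i j)] else acc2)
        = fun acc2 j =>
            if (fun j => pvVis vis i && !pvVis vis j && decide (0 < pvW og i j)) j = true
            then acc2 ++ [(pvName i, pvName j, pvW og i j)] else acc2 := by
      funext acc2 j
      by_cases h1 : pvVis vis i = true <;> by_cases h2 : pvVis vis j = false <;>
        by_cases h3 : 0 < pvW og i j <;> simp [h1, h2, h3]
    rw [hfun, PySem.List.foldl_append_if]
  have hbody : (fun (acc : List (String × String × Int)) i =>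
      (PySem.List.pyRange 0 (PySem.List.len (PySem.List.pyGetD og i [])) 1).foldl
        (fun acc2 j => if pvVis vis i = true ∧ pvVis vis j = false ∧ 0 < pvW og i j
          then acc2 ++ [(pvName i, pvName j, pvW og i j)] else acc2) acc)
      = fun acc i => acc ++
          ((PySem.List.pyRange 0 (PySem.List.len (PySem.List.pyGetD og i [])) 1).filter
            (fun j => pvVis vis i && !pvVis vis j && decide (0 < pvW og i j))).map
            (fun j => (pvName i, pvName j, pvW og i j)) := by
    funext acc i
    exact hinner i acc
  rw [hbody, PySem.List.foldl_append_eq_flatMap, List.nil_append,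
    PySem.List.enumerate_eq_map_pyRange og [], List.flatMap_map]
  rw [List.flatMap_def, List.flatMap_def]
  congr 1
  apply List.map_congr_left
  intro i _
  by_cases hvi : pvVis vis i = true
  · rw [if_pos hvi]
    rw [PySem.List.enumerate_eq_map_pyRange (PySem.List.pyGetD og i []) 0, List.filterMap_map,
      mapFilter_eq_filterMap]
    apply List.filterMap_congr
    intro j _
    by_cases h2 : pvVis vis j = false <;> simp [hvi, h2, Function.comp, pvW]
  · have hvi' : pvVis vis i = false := by simpa using hvi
    simp [hvi']

-- ===== VERDICT (by name: the statement is the Claim_ definition above) =====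
theorem find_min_cut_spec : Claim_equal_find_min_cut := by
  intro rg s og _ hpre
  obtain ⟨hs0, hs1, h9, _hsq, _hog, _hrow⟩ := hpre
  unfold Spec_find_min_cut find_min_cut find_min_cut_alt
  dsimp only
  obtain ⟨hagree, hlen⟩ := visited_agree_all rg s hs0 hs1
  rw [hagree]
  refine Prod.ext ?_ (Prod.ext ?_ ?_)
  · simpa using partition_eq _ true (by omega)
  · simpa using partition_eq _ false (by omega)
  · simpa using cut_eq _ og
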